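-- pv_equiv track=rewrite | github.com/T3tsuo/PokemonScripts | ItemFarming/EverstoneFarming/time_to_seconds.py | sum_seconds
-- ===== SOURCE A (Python) =====
-- def sum_seconds(date_format):
--     time_map = {}
--     time_string = ["hours", "minutes"]
--     time_list = date_format.split(".")
--
--     for i in range(len(time_list)):
--         if time_list[i] != '':
--             time_map[time_string[i]] = int(time_list[i])
--
--     temp = 0
--     if "hours" in time_map:
--         temp += time_map["hours"] * 3600
--     if "minutes" in time_map:
--         temp += time_map["minutes"] * 60
--     return temp
-- ===== SOURCE B (Python) =====
-- def sum_seconds(date_format):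
--     # Horner evaluation in base 60: pad/truncate to exactly two fields,
--     # then seconds = ((hours)*60 + minutes)*60.
--     fields = (date_format.split(".") + ["", ""])[:2]
--     val = 0
--     for f in fields:
--         val = val * 60 + (int(f) if f != '' else 0)
--     return val * 60
-- ===== Notes on version B (the rewrite author's own statement) =====
-- stated objective: alternative
-- what changed: Replaces the dict of named fields plus two weighted membership checks with a base-60 Horner evaluation: pad/truncate the split to exactly two fields and fold val -> val*60 + field, then multiply by 60; no dict, no weight table.
import Mathlib
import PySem

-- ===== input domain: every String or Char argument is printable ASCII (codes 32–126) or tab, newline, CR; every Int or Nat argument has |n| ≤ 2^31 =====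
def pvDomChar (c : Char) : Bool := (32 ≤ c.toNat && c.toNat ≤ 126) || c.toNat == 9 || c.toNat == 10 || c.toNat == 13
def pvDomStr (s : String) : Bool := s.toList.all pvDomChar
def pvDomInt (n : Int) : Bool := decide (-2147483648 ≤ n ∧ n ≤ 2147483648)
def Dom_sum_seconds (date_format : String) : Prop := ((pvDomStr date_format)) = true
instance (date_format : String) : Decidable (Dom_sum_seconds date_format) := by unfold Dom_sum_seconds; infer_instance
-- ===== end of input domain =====

-- ===== PORT A =====
-- B replaces the dict of named weighted fields with a base-60 Horner evaluation over the
-- first two '.'-fields (padded with ''); equivalence is exact on Pre_ (where A returns).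
def sum_seconds (date_format : String) : Int :=
  let time_string : List String := ["hours", "minutes"]
  let time_list := (PySem.Str.split? date_format ".").getD []
  let time_map : PySem.Dict String Int :=
    (PySem.List.pyRange 0 time_list.length 1).foldl
      (fun m i =>
        if PySem.List.pyGetD time_list i "" ≠ "" then
          -- time_string[i] raises IndexError and int(...) raises ValueError outside Pre_;
          -- the defaults below are never reached under Pre_.
          m.insert (PySem.List.pyGetD time_string i "")
            ((PySem.Int.ofStr? (PySem.List.pyGetD time_list i "")).getD 0)
        else m)
      PySem.Dict.empty
  let temp : Int := 0
  let temp := if time_map.contains "hours" then temp + time_map.getD "hours" 0 * 3600 else temp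
  let temp := if time_map.contains "minutes" then temp + time_map.getD "minutes" 0 * 60 else temp
  temp

-- ===== PORT B =====
def sum_seconds_alt (date_format : String) : Int :=
  let fields := PySem.List.slice (((PySem.Str.split? date_format ".").getD []) ++ ["", ""]) (some 0) (some 2)
  (fields.foldl
    (fun val f => val * 60 + (if f ≠ "" then (PySem.Int.ofStr? f).getD 0 else 0)) 0) * 60

-- ===== PRECONDITION & SPEC =====
-- Pre_ excludes exactly the inputs where Python A raises: a non-empty piece at split index ≥ 2
-- (IndexError on time_string[i]) or a non-empty piece that is not int()-parsable (ValueError).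
def Pre_sum_seconds (date_format : String) : Prop :=
  ∀ i : Nat, i < ((PySem.Str.split? date_format ".").getD []).length →
    ((PySem.Str.split? date_format ".").getD []).getD i "" ≠ "" →
    i < 2 ∧ (PySem.Int.ofStr? (((PySem.Str.split? date_format ".").getD []).getD i "")).isSome
instance (date_format : String) : Decidable (Pre_sum_seconds date_format) := by
  unfold Pre_sum_seconds; infer_instance
def pvWitness_sum_seconds : String := "1.2"
def Spec_sum_seconds (date_format : String) (out : Int) : Prop := out = sum_seconds_alt date_format
instance (date_format : String) (out : Int) : Decidable (Spec_sum_seconds date_format out) := by unfold Spec_sum_seconds; infer_instance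

-- ===== CLAIM (what is proved, stated in full; the proofs are below) =====
def Claim_equal_sum_seconds : Prop := ∀ (date_format : String), Dom_sum_seconds date_format → Pre_sum_seconds date_format → Spec_sum_seconds date_format (sum_seconds date_format)

-- ===== LEMMAS AND PROOFS =====

theorem pv_foldl_id {α β : Type} (f : β → α → β) (l : List α)
    (h : ∀ b x, x ∈ l → f b x = b) : ∀ b, l.foldl f b = b := by
  induction l with
  | nil => intro b; rfl
  | cons x xs ih =>
    intro b
    rw [List.foldl_cons, h b x (by simp)]
    exact ih (fun b y hy => h b y (by simp [hy])) b

def pvStepA (time_list : List String) (m : PySem.Dict String Int) (i : Int) : PySem.Dict String Int :=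
  if PySem.List.pyGetD time_list i "" ≠ "" then
    m.insert (PySem.List.pyGetD (["hours", "minutes"] : List String) i "")
      ((PySem.Int.ofStr? (PySem.List.pyGetD time_list i "")).getD 0)
  else m

def pvStepB (val : Int) (f : String) : Int :=
  val * 60 + (if f ≠ "" then (PySem.Int.ofStr? f).getD 0 else 0)

theorem pv_main (parts : List String)
    (hpre : ∀ i : Nat, i < parts.length → parts.getD i "" ≠ "" →
      i < 2 ∧ (PySem.Int.ofStr? (parts.getD i "")).isSome) :
    (let time_map := (PySem.List.pyRange 0 parts.length 1).foldl (pvStepA parts) PySem.Dict.empty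
     let temp : Int := 0
     let temp := if time_map.contains "hours" then temp + time_map.getD "hours" 0 * 3600 else temp
     if time_map.contains "minutes" then temp + time_map.getD "minutes" 0 * 60 else temp)
    = ((PySem.List.slice (parts ++ ["", ""]) (some 0) (some 2)).foldl pvStepB 0) * 60 := by
  have hslice : ∀ (xs : List String), PySem.List.slice (xs ++ ["", ""]) (some (0:Int)) (some (2:Int)) = (xs ++ ["", ""]).take 2 := by
    intro xs
    have := PySem.List.slice_natCast (xs ++ ["", ""]) 0 2
    simpa using this
  match parts with
  | [] => rw [hslice]; decide
  | [p0] =>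
    rw [hslice]
    by_cases h0 : p0 = ""
    · subst h0; decide
    · obtain ⟨-, hs⟩ := hpre 0 (by simp) (by simpa)
      obtain ⟨v0, hv0⟩ := Option.isSome_iff_exists.mp hs
      simp at hv0
      simp [pvStepA, pvStepB, PySem.List.pyRange, PySem.List.pyGetD, hv0, h0,
        PySem.Dict.contains, PySem.Dict.insert, PySem.Dict.getD, PySem.Dict.get?, PySem.Dict.empty]
      ring
  | p0 :: p1 :: rest =>
    have hempty : ∀ x ∈ rest, x = "" := by
      intro x hx
      obtain ⟨k, hk, rfl⟩ := List.mem_iff_getElem.mp hx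
      by_contra hne
      have := (hpre (k + 2) (by simp; omega) (by
        simp [List.getD, List.getElem?_cons_succ, List.getElem?_eq_getElem hk]
        exact hne)).1
      omega
    have hA : (PySem.List.pyRange 0 (p0 :: p1 :: rest).length 1).foldl
        (pvStepA (p0 :: p1 :: rest)) PySem.Dict.empty
        = (PySem.List.pyRange 0 2 1).foldl (pvStepA (p0 :: p1 :: rest)) PySem.Dict.empty := by
      rw [PySem.List.pyRange_one_append 0 2 ((p0 :: p1 :: rest).length : Int) (by omega)
        (by simp; omega), List.foldl_append]
      apply pv_foldl_id
      intro m x hx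
      obtain ⟨h2, hlt⟩ := (PySem.List.mem_pyRange_one).mp hx
      have hnn : (0:Int) ≤ x := by omega
      have hlen : x < ((p0 :: p1 :: rest).length : Int) := by simpa using hlt
      have hget : PySem.List.pyGetD (p0 :: p1 :: rest) x "" = "" := by
        rw [PySem.List.pyGetD_eq_getElem _ _ hnn hlen]
        obtain ⟨k, hk⟩ : ∃ k, x.toNat = k + 2 := ⟨x.toNat - 2, by omega⟩
        simp only [hk, List.getElem_cons_succ]
        exact hempty _ (List.getElem_mem _)
      simp [pvStepA, hget]
    have hB : PySem.List.slice ((p0 :: p1 :: rest) ++ ["", ""]) (some (0:Int)) (some (2:Int)) = [p0, p1] := by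
      rw [hslice]; rfl
    rw [hA, hB]
    have hr2 : PySem.List.pyRange (0:Int) 2 1 = [0, 1] := by decide
    by_cases h0 : p0 = "" <;> by_cases h1 : p1 = ""
    · subst h0; subst h1
      simp [hr2, pvStepA, pvStepB, PySem.List.pyGetD]
    · obtain ⟨-, hs⟩ := hpre 1 (by simp) (by simpa [List.getD])
      obtain ⟨v1, hv1⟩ := Option.isSome_iff_exists.mp hs
      simp [List.getD] at hv1
      subst h0
      simp [hr2, pvStepA, pvStepB, PySem.List.pyGetD, hv1, h1,
        PySem.Dict.contains, PySem.Dict.insert, PySem.Dict.getD, PySem.Dict.get?, PySem.Dict.empty]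
    · obtain ⟨-, hs⟩ := hpre 0 (by simp) (by simpa [List.getD])
      obtain ⟨v0, hv0⟩ := Option.isSome_iff_exists.mp hs
      simp [List.getD] at hv0
      subst h1
      simp [hr2, pvStepA, pvStepB, PySem.List.pyGetD, hv0, h0,
        PySem.Dict.contains, PySem.Dict.insert, PySem.Dict.getD, PySem.Dict.get?, PySem.Dict.empty]
      ring
    · obtain ⟨-, hs0⟩ := hpre 0 (by simp) (by simpa [List.getD])
      obtain ⟨v0, hv0⟩ := Option.isSome_iff_exists.mp hs0
      simp [List.getD] at hv0
      obtain ⟨-, hs1⟩ := hpre 1 (by simp) (by simpa [List.getD])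
      obtain ⟨v1, hv1⟩ := Option.isSome_iff_exists.mp hs1
      simp [List.getD] at hv1
      simp [hr2, pvStepA, pvStepB, PySem.List.pyGetD, hv0, hv1, h0, h1,
        PySem.Dict.contains, PySem.Dict.insert, PySem.Dict.getD, PySem.Dict.get?, PySem.Dict.empty]
      ring

-- ===== VERDICT (by name: the statement is the Claim_ definition above) =====
theorem sum_seconds_spec : Claim_equal_sum_seconds := by
  intro date_format _ hpre
  unfold Spec_sum_seconds sum_seconds sum_seconds_alt
  exact pv_main ((PySem.Str.split? date_format ".").getD []) hpre
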